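-- pv_equiv track=rewrite | github.com/suganyajulianna/chatbot_optiMES | app.py | infer_collections_from_input
-- ===== SOURCE A (Python) =====
-- def infer_collections_from_input(user_input):
--     input_lower = user_input.lower()
--     matched = []
--
--     if "fire" in input_lower or "smoke" in input_lower:
--         matched.append("fires")
--     if "gas" in input_lower or "leak" in input_lower:
--         matched.append("gasleakages")
--     if "ppe" in input_lower or "helmet" in input_lower or "vest" in input_lower:
--         matched.append("ppekits")
--     if "slip" in input_lower or "fall" in input_lower:
--         matched.append("slips")
--     if "occupancy" in input_lower or "vacancy" in input_lower:
--         matched.append("occupancies")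
--     if any(term in input_lower for term in ["unauthorized", "unauthorised", "authorized", "authorised", "intruder"]):
--         matched.append("unauthorizedentries")
--
--     return matched if matched else []
-- ===== SOURCE B (Python) =====
-- # Single left-to-right position scan: at each suffix of the lowered input, test which
-- # keywords start there, accumulating matched collection names in a set; finally emit
-- # the names in canonical order.
-- KEYWORDS = [
--     ("fire", "fires"), ("smoke", "fires"),
--     ("gas", "gasleakages"), ("leak", "gasleakages"),
--     ("ppe", "ppekits"), ("helmet", "ppekits"), ("vest", "ppekits"),
--     ("slip", "slips"), ("fall", "slips"),
--     ("occupancy", "occupancies"), ("vacancy", "occupancies"),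
--     ("unauthorized", "unauthorizedentries"), ("unauthorised", "unauthorizedentries"),
--     ("authorized", "unauthorizedentries"), ("authorised", "unauthorizedentries"),
--     ("intruder", "unauthorizedentries"),
-- ]
--
-- ORDER = ["fires", "gasleakages", "ppekits", "slips", "occupancies", "unauthorizedentries"]
--
-- def infer_collections_from_input(user_input):
--     t = user_input.lower()
--     found = set()
--     for i in range(len(t)):
--         for kw, name in KEYWORDS:
--             if t.startswith(kw, i):
--                 found.add(name)
--     return [name for name in ORDER if name in found]
-- ===== Notes on version B (the rewrite author's own statement) =====
-- stated objective: alternative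
-- what changed: Replaced the six independent per-keyword substring tests by a single left-to-right scan of the lowered input that, at each suffix, checks which keywords start there, accumulating matched collection names in a set and emitting them in the fixed canonical order.
import Mathlib
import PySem

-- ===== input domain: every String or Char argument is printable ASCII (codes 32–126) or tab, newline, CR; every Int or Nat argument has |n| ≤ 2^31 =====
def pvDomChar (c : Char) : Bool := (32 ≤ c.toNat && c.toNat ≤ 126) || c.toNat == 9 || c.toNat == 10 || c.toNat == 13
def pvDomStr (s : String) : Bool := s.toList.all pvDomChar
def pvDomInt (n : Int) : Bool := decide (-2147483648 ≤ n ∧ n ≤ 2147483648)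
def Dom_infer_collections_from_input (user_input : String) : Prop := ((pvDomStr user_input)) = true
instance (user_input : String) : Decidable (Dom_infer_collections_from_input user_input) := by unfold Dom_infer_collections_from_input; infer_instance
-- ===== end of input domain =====

-- B replaces A's six independent substring tests by ONE left-to-right scan of the lowered
-- input that, at every suffix, tests which keywords start there, accumulating collection
-- names in a set and emitting them in canonical order (alternative algorithm; same cost).

-- ===== PORT A =====
def infer_collections_from_input (user_input : String) : List String :=
  let input_lower := PySem.Str.lower user_input
  let matched : List String := []
  let matched := if PySem.Str.isIn "fire" input_lower || PySem.Str.isIn "smoke" input_lower then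
    matched ++ ["fires"] else matched
  let matched := if PySem.Str.isIn "gas" input_lower || PySem.Str.isIn "leak" input_lower then
    matched ++ ["gasleakages"] else matched
  let matched := if PySem.Str.isIn "ppe" input_lower || PySem.Str.isIn "helmet" input_lower
      || PySem.Str.isIn "vest" input_lower then
    matched ++ ["ppekits"] else matched
  let matched := if PySem.Str.isIn "slip" input_lower || PySem.Str.isIn "fall" input_lower then
    matched ++ ["slips"] else matched
  let matched := if PySem.Str.isIn "occupancy" input_lower || PySem.Str.isIn "vacancy" input_lower then
    matched ++ ["occupancies"] else matched
  let matched := if (["unauthorized", "unauthorised", "authorized", "authorised", "intruder"] : List String).any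
      (fun term => PySem.Str.isIn term input_lower) then
    matched ++ ["unauthorizedentries"] else matched
  if matched ≠ [] then matched else []

-- ===== PORT B =====
def pvKeywords : List (String × String) :=
  [ ("fire", "fires"), ("smoke", "fires"),
    ("gas", "gasleakages"), ("leak", "gasleakages"),
    ("ppe", "ppekits"), ("helmet", "ppekits"), ("vest", "ppekits"),
    ("slip", "slips"), ("fall", "slips"),
    ("occupancy", "occupancies"), ("vacancy", "occupancies"),
    ("unauthorized", "unauthorizedentries"), ("unauthorised", "unauthorizedentries"),
    ("authorized", "unauthorizedentries"), ("authorised", "unauthorizedentries"),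
    ("intruder", "unauthorizedentries") ]

def pvOrder : List String :=
  ["fires", "gasleakages", "ppekits", "slips", "occupancies", "unauthorizedentries"]

-- 'for i in range(len(t)):' with 't.startswith(kw, i)' ported as a prefix test on
-- 't.drop i' — exact for the indices 0 ≤ i < len(t) that range produces
def infer_collections_from_input_alt (user_input : String) : List String :=
  let t := (PySem.Str.lower user_input).toList
  let found := (PySem.List.pyRange 0 (t.length : Int) 1).foldl
    (fun f i =>
      pvKeywords.foldl
        (fun f p => if PySem.Chars.startswith (List.drop i.toNat t) p.1.toList then PySem.Set.add f p.2 else f)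
        f)
    PySem.Set.empty
  pvOrder.filter (fun name => PySem.Set.contains found name)

-- ===== PRECONDITION & SPEC =====
def Spec_infer_collections_from_input (user_input : String) (out : List String) : Prop := out = infer_collections_from_input_alt user_input
instance (user_input : String) (out : List String) : Decidable (Spec_infer_collections_from_input user_input out) := by unfold Spec_infer_collections_from_input; infer_instance

-- ===== CLAIM (what is proved, stated in full; the proofs are below) =====
def Claim_equal_infer_collections_from_input : Prop := ∀ (user_input : String), Dom_infer_collections_from_input user_input → Spec_infer_collections_from_input user_input (infer_collections_from_input user_input)

-- ===== LEMMAS AND PROOFS =====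

-- proof-only helper: the scan reformulated as structural recursion on the suffix
def pvScan : List Char → PySem.Set String → PySem.Set String
  | [], found => found
  | c :: rest, found =>
      pvScan rest
        (pvKeywords.foldl
          (fun f p => if PySem.Chars.startswith (c :: rest) p.1.toList then PySem.Set.add f p.2 else f)
          found)

-- B's index loop over range(len(t)) computes pvScan
theorem pv_foldl_range_eq_scan (t : List Char) (found : PySem.Set String) :
    (PySem.List.pyRange 0 (t.length : Int) 1).foldl
        (fun f i =>
          pvKeywords.foldl
            (fun f p => if PySem.Chars.startswith (List.drop i.toNat t) p.1.toList then PySem.Set.add f p.2 else f)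
            f)
        found
      = pvScan t found := by
  induction t generalizing found with
  | nil => simp [pvScan, PySem.List.pyRange_one_eq_nil]
  | cons c rest ih =>
    simp only [List.length_cons, Nat.cast_add, Nat.cast_one]
    rw [PySem.List.pyRange_one_cons (by positivity), List.foldl_cons]
    simp only [zero_add, Int.toNat_zero, List.drop_zero]
    have hshift : PySem.List.pyRange 1 ((rest.length : Int) + 1) 1
        = (PySem.List.pyRange 0 (rest.length : Int) 1).map (fun x => x + 1) := by
      rw [PySem.List.pyRange_one, PySem.List.pyRange_one]
      simp [List.map_map, Function.comp_def, add_comm]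
    rw [hshift, List.foldl_map]
    rw [show ∀ f0, (PySem.List.pyRange 0 (rest.length : Int) 1).foldl
          (fun f i =>
            pvKeywords.foldl
              (fun f p => if PySem.Chars.startswith (List.drop (i + 1).toNat (c :: rest)) p.1.toList then PySem.Set.add f p.2 else f)
              f) f0
        = (PySem.List.pyRange 0 (rest.length : Int) 1).foldl
          (fun f i =>
            pvKeywords.foldl
              (fun f p => if PySem.Chars.startswith (List.drop i.toNat rest) p.1.toList then PySem.Set.add f p.2 else f)
              f) f0 from fun f0 => by
      apply PySem.List.foldl_congr_mem
      intro f i hi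
      have h0 : 0 ≤ i := ((PySem.List.mem_pyRange_one).mp hi).1
      have : (i + 1).toNat = i.toNat + 1 := by omega
      rw [this, List.drop_succ_cons]]
    rw [ih]
    rfl

-- membership after the inner for-loop over the keyword table
theorem pv_mem_inner (KW : List (String × String)) (t : List Char) (found : PySem.Set String)
    (name : String) :
    name ∈ KW.foldl
        (fun f p => if PySem.Chars.startswith t p.1.toList then PySem.Set.add f p.2 else f) found
      ↔ name ∈ found ∨ ∃ p ∈ KW, PySem.Chars.startswith t p.1.toList = true ∧ p.2 = name := by
  induction KW generalizing found with
  | nil => simp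
  | cons q KW ih =>
    simp only [List.foldl_cons, ih, List.mem_cons]
    by_cases hq : PySem.Chars.startswith t q.1.toList = true
    · simp [hq, PySem.Set.mem_add]
      try tauto
    · simp [hq]
      try tauto

-- membership after the whole scan: name is found iff one of its keywords occurs in t
theorem pv_mem_scan (t : List Char) (found : PySem.Set String) (name : String) :
    name ∈ pvScan t found
      ↔ name ∈ found ∨ ∃ p ∈ pvKeywords, PySem.Chars.isIn p.1.toList t = true ∧ p.2 = name := by
  induction t generalizing found with
  | nil =>
    simp only [pvScan]
    constructor
    · exact Or.inl
    · rintro (h | ⟨p, hp, hin, -⟩)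
      · exact h
      · exfalso
        rw [PySem.Chars.isIn_iff_infix] at hin
        rw [List.infix_nil] at hin
        have : p.1.toList ≠ [] := by
          fin_cases hp <;> decide
        exact this hin
  | cons c rest ih =>
    simp only [pvScan, ih, pv_mem_inner]
    have hsplit : ∀ p : String × String,
        PySem.Chars.isIn p.1.toList (c :: rest) = true
          ↔ PySem.Chars.startswith (c :: rest) p.1.toList = true
            ∨ PySem.Chars.isIn p.1.toList rest = true := by
      intro p
      rw [PySem.Chars.isIn_iff_infix, PySem.Chars.isIn_iff_infix,
        PySem.Chars.startswith_iff, List.infix_cons_iff]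
    constructor
    · rintro ((h | ⟨p, hp, hs, hn⟩) | ⟨p, hp, hin, hn⟩)
      · exact Or.inl h
      · exact Or.inr ⟨p, hp, (hsplit p).mpr (Or.inl hs), hn⟩
      · exact Or.inr ⟨p, hp, (hsplit p).mpr (Or.inr hin), hn⟩
    · rintro (h | ⟨p, hp, hin, hn⟩)
      · exact Or.inl (Or.inl h)
      · rcases (hsplit p).mp hin with hs | hr
        · exact Or.inl (Or.inr ⟨p, hp, hs, hn⟩)
        · exact Or.inr ⟨p, hp, hr, hn⟩

-- ===== VERDICT (by name: the statement is the Claim_ definition above) =====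
theorem infer_collections_from_input_spec : Claim_equal_infer_collections_from_input := by
  intro s _
  show infer_collections_from_input s = infer_collections_from_input_alt s
  unfold infer_collections_from_input infer_collections_from_input_alt
  have hid : ∀ l : List String, (if l ≠ [] then l else []) = l := by
    intro l; by_cases h : l = [] <;> simp [h]
  have hmem : ∀ name : String,
      PySem.Set.contains (pvScan (PySem.Str.lower s).toList PySem.Set.empty) name = true
        ↔ ∃ p ∈ pvKeywords, PySem.Chars.isIn p.1.toList (PySem.Str.lower s).toList = true
            ∧ p.2 = name := by
    intro name
    rw [show (PySem.Set.contains (pvScan (PySem.Str.lower s).toList PySem.Set.empty) name = true)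
          ↔ name ∈ pvScan (PySem.Str.lower s).toList PySem.Set.empty from by
        simp [pysem, PySem.Set.contains]]
    rw [pv_mem_scan]
    simp [PySem.Set.empty]
  simp only [hid, List.any_cons, List.any_nil, Bool.or_false, PySem.Str.isIn_eq,
    pv_foldl_range_eq_scan]
  simp only [pvOrder, List.filter_cons, List.filter_nil]
  simp only [hmem]
  simp only [pvKeywords, List.mem_cons, List.not_mem_nil]
  simp only [List.exists_mem_cons_iff, String.reduceEq, and_true, and_false, false_or,
    or_false, List.not_mem_nil, false_and, exists_false, Bool.or_eq_true, or_assoc]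
  split_ifs <;> rfl
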